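-- pv_equiv track=rewrite | github.com/muratsalikk/anbu | eva/db.py | escape_psycopg_percent_literals
-- ===== SOURCE A (Python) =====
-- from typing import Any, Dict, Iterator, List, Optional, Tuple
--
-- def escape_psycopg_percent_literals(sql_text: str) -> str:
--     if "%" not in sql_text:
--         return sql_text
--     out: List[str] = []
--     i = 0
--     while i < len(sql_text):
--         ch = sql_text[i]
--         if ch == "%":
--             if i + 1 < len(sql_text) and sql_text[i + 1] == "%":
--                 out.append("%%")
--                 i += 2
--                 continue
--             out.append("%%")
--             i += 1
--             continue
--         out.append(ch)
--         i += 1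
--     return "".join(out)
-- ===== SOURCE B (Python) =====
-- from typing import List
--
-- def escape_psycopg_percent_literals(sql_text: str) -> str:
--     # Run-length pass: each maximal run of n '%' becomes n + n % 2 percents.
--     parts: List[str] = []
--     run = 0
--     for ch in sql_text:
--         if ch == "%":
--             run += 1
--         else:
--             if run:
--                 parts.append("%" * (run + run % 2))
--                 run = 0
--             parts.append(ch)
--     if run:
--         parts.append("%" * (run + run % 2))
--     return "".join(parts)
-- ===== Notes on version B (the rewrite author's own statement) =====
-- stated objective: simpler
-- what changed: Replaces the index-based lookahead state machine with a single run-length pass that emits n + n%2 percents per maximal '%' run.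
import Mathlib
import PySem

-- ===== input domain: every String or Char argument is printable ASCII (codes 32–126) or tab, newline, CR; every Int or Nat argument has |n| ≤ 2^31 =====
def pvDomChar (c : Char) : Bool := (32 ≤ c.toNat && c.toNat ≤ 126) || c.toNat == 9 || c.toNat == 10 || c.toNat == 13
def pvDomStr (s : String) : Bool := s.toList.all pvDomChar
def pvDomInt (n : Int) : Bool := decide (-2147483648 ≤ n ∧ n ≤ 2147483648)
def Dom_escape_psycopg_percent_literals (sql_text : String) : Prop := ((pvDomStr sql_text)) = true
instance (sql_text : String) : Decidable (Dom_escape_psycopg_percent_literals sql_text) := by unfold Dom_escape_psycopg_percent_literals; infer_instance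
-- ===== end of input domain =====

-- B replaces A's index/lookahead scan by a single run-length pass (same output, similar cost).

-- ===== PORT A =====
-- the while-loop of A: head char, with a lookahead at the next char for '%'
def pvALoop : List Char → List Char
  | [] => []
  | '%' :: '%' :: rest => '%' :: '%' :: pvALoop rest   -- ch = '%', lookahead '%': append "%%", i += 2
  | '%' :: rest => '%' :: '%' :: pvALoop rest          -- ch = '%', no '%' lookahead: append "%%", i += 1
  | c :: rest => c :: pvALoop rest

def escape_psycopg_percent_literals (sql_text : String) : String :=
  if '%' ∈ sql_text.toList then String.ofList (pvALoop sql_text.toList) else sql_text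

-- ===== PORT B =====
-- the for-loop of B: accumulate the length `run` of the current '%' run,
-- flush `run + run % 2` percents at each non-'%' char and at the end
def pvBLoop : List Char → Nat → List Char
  | [], run => List.replicate (run + run % 2) '%'
  | c :: rest, run =>
    if c = '%' then pvBLoop rest (run + 1)
    else List.replicate (run + run % 2) '%' ++ c :: pvBLoop rest 0

def escape_psycopg_percent_literals_alt (sql_text : String) : String :=
  String.ofList (pvBLoop sql_text.toList 0)

-- ===== PRECONDITION & SPEC =====
def Spec_escape_psycopg_percent_literals (sql_text : String) (out : String) : Prop := out = escape_psycopg_percent_literals_alt sql_text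
instance (sql_text : String) (out : String) : Decidable (Spec_escape_psycopg_percent_literals sql_text out) := by unfold Spec_escape_psycopg_percent_literals; infer_instance

-- ===== CLAIM (what is proved, stated in full; the proofs are below) =====
def Claim_equal_escape_psycopg_percent_literals : Prop := ∀ (sql_text : String), Dom_escape_psycopg_percent_literals sql_text → Spec_escape_psycopg_percent_literals sql_text (escape_psycopg_percent_literals sql_text)

-- ===== LEMMAS AND PROOFS =====

theorem pvBLoop_shift (l : List Char) : ∀ run, pvBLoop l (run + 2) = '%' :: '%' :: pvBLoop l run := by
  induction l with
  | nil =>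
    intro run
    have h : run + 2 + (run + 2) % 2 = run + run % 2 + 1 + 1 := by omega
    simp only [pvBLoop, h, List.replicate_succ]
  | cons c rest ih =>
    intro run
    by_cases hc : c = '%'
    · simp only [pvBLoop, if_pos hc]
      have := ih (run + 1)
      simpa [Nat.add_right_comm run 2 1] using this
    · have h : run + 2 + (run + 2) % 2 = run + run % 2 + 1 + 1 := by omega
      simp only [pvBLoop, if_neg hc, h, List.replicate_succ]
      simp

theorem pvKey : ∀ (l : List Char), pvALoop l = pvBLoop l 0
  | [] => rfl
  | '%' :: '%' :: l => by
    have ih := pvKey l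
    show '%' :: '%' :: pvALoop l = pvBLoop ('%' :: '%' :: l) 0
    rw [ih]
    have h2 : pvBLoop ('%' :: '%' :: l) 0 = pvBLoop l 2 := by simp [pvBLoop]
    rw [h2, show (2 : Nat) = 0 + 2 from rfl, pvBLoop_shift]
  | '%' :: l => by
    match l with
    | [] => decide
    | c :: l' =>
      by_cases hc : c = '%'
      · subst hc
        have ih := pvKey l'
        show '%' :: '%' :: pvALoop l' = pvBLoop ('%' :: '%' :: l') 0
        rw [ih]
        have h2 : pvBLoop ('%' :: '%' :: l') 0 = pvBLoop l' 2 := by simp [pvBLoop]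
        rw [h2, show (2 : Nat) = 0 + 2 from rfl, pvBLoop_shift]
      · have ih := pvKey l'
        have ha : pvALoop ('%' :: c :: l') = '%' :: '%' :: pvALoop (c :: l') := by
          simp [pvALoop, hc]
        rw [ha]
        have hb : pvBLoop ('%' :: c :: l') 0 = '%' :: '%' :: c :: pvBLoop l' 0 := by
          simp [pvBLoop, hc, List.replicate_succ]
        rw [hb]
        have ha2 : pvALoop (c :: l') = c :: pvALoop l' := by simp [pvALoop, hc]
        rw [ha2, ih]
  | c :: l => by
    by_cases hc : c = '%'
    · subst hc
      match l with
      | [] => decide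
      | c' :: l' =>
        by_cases hc' : c' = '%'
        · subst hc'
          have ih := pvKey l'
          show '%' :: '%' :: pvALoop l' = pvBLoop ('%' :: '%' :: l') 0
          rw [ih]
          have h2 : pvBLoop ('%' :: '%' :: l') 0 = pvBLoop l' 2 := by simp [pvBLoop]
          rw [h2, show (2 : Nat) = 0 + 2 from rfl, pvBLoop_shift]
        · have ih := pvKey l'
          have ha : pvALoop ('%' :: c' :: l') = '%' :: '%' :: pvALoop (c' :: l') := by
            simp [pvALoop, hc']
          have ha2 : pvALoop (c' :: l') = c' :: pvALoop l' := by simp [pvALoop, hc']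
          have hb : pvBLoop ('%' :: c' :: l') 0 = '%' :: '%' :: c' :: pvBLoop l' 0 := by
            simp [pvBLoop, hc', List.replicate_succ]
          rw [ha, ha2, ih, hb]
    · have ih := pvKey l
      have ha : pvALoop (c :: l) = c :: pvALoop l := by simp [pvALoop, hc]
      have hb : pvBLoop (c :: l) 0 = c :: pvBLoop l 0 := by simp [pvBLoop, hc]
      rw [ha, hb, ih]

theorem pvBLoop_noPct : ∀ (l : List Char), '%' ∉ l → pvBLoop l 0 = l := by
  intro l h
  induction l with
  | nil => rfl
  | cons c rest ih =>
    have hc : c ≠ '%' := fun e => h (e ▸ List.mem_cons_self ..)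
    simp [pvBLoop, hc, ih (fun m => h (List.mem_cons_of_mem _ m))]

-- ===== VERDICT (by name: the statement is the Claim_ definition above) =====
theorem escape_psycopg_percent_literals_spec : Claim_equal_escape_psycopg_percent_literals := by
  intro s _
  unfold Spec_escape_psycopg_percent_literals escape_psycopg_percent_literals escape_psycopg_percent_literals_alt
  by_cases h : '%' ∈ s.toList
  · rw [if_pos h, pvKey]
  · rw [if_neg h, pvBLoop_noPct _ h, String.ofList_toList]
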